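-- pv_equiv track=rewrite | github.com/masa08/leetcode | explore/data_structures/graph/bfs.py | bfs_all_paths_at_distance
-- ===== SOURCE A (Python) =====
-- from collections import deque
-- from typing import List, Dict, Set
--
-- def bfs_all_paths_at_distance(
--     graph: Dict[int, List[int]],
--     start: int,
--     distance: int
-- ) -> List[int]:
--     """
--     開始ノードから指定距離にあるすべてのノードを取得
--
--     Args:
--         graph: 隣接リストで表現されたグラフ
--         start: 開始ノード
--         distance: 距離
--
--     Returns:
--         指定距離にあるノードのリスト
--     """
--     visited = {start}
--     queue = deque([(start, 0)])
--     nodes_at_distance = []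
--
--     while queue:
--         node, level = queue.popleft()
--
--         if level == distance:
--             nodes_at_distance.append(node)
--             continue  # これ以上探索しない
--
--         if level < distance:
--             for neighbor in graph.get(node, []):
--                 if neighbor not in visited:
--                     visited.add(neighbor)
--                     queue.append((neighbor, level + 1))
--
--     return nodes_at_distance
-- ===== SOURCE B (Python) =====
-- def bfs_all_paths_at_distance(graph, start, distance):
--     """Level-synchronous BFS: advance whole frontiers round by round."""
--     visited = {start}
--     frontier = [start]
--     level = 0
--     while level < distance and frontier:
--         next_frontier = []
--         for node in frontier:
--             for neighbor in graph.get(node, []):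
--                 if neighbor not in visited:
--                     visited.add(neighbor)
--                     next_frontier.append(neighbor)
--         frontier = next_frontier
--         level += 1
--     return frontier if level == distance else []
-- ===== Notes on version B (the rewrite author's own statement) =====
-- stated objective: alternative
-- what changed: Replaces A's single FIFO queue of (node, level) pairs by a level-synchronous BFS that advances a whole frontier per round (visited, frontier, next_frontier, level counter) and returns the frontier reached at the requested distance.
import Mathlib
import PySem

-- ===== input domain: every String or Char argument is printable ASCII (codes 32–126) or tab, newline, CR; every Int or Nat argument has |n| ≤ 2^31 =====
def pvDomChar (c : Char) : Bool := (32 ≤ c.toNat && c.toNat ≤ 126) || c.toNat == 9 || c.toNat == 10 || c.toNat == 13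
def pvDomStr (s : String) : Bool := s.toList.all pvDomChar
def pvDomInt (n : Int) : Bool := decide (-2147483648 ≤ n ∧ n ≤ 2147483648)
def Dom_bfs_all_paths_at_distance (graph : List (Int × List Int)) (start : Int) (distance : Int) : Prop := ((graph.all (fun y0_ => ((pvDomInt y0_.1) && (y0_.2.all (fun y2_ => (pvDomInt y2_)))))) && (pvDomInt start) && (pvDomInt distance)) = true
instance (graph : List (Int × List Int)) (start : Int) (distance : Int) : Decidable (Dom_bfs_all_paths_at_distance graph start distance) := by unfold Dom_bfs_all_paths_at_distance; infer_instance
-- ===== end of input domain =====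

-- B replaces A's level-tagged FIFO queue by level-synchronous whole-frontier rounds (same results; objective: alternative decomposition).


-- ===== PORT A =====
-- visited : Python set → PySem.Set Int; queue of (node, level) pairs; graph.get(node, []) → PySem.Dict.getD.
-- number of neighbour occurrences (with multiplicity) not yet visited: part of A's termination measure
def pvUnseen (graph : List (Int × List Int)) (visited : PySem.Set Int) : Nat :=
  ((graph.flatMap Prod.snd).filter (fun x => !(PySem.Set.contains visited x))).length

-- one step of A's inner `for neighbor in graph.get(node, [])` loop (lvl1 = level + 1)
def pvStepA (lvl1 : Int) (s : PySem.Set Int × List (Int × Int)) (nb : Int) : PySem.Set Int × List (Int × Int) :=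
  if PySem.Set.contains s.1 nb then s else (PySem.Set.add s.1 nb, s.2 ++ [(nb, lvl1)])

theorem pvStepA_pos (lvl1 : Int) (s : PySem.Set Int × List (Int × Int)) (nb : Int) (h : nb ∈ s.1) :
    pvStepA lvl1 s nb = s := by
  simp [pvStepA, h]

theorem pvStepA_neg (lvl1 : Int) (s : PySem.Set Int × List (Int × Int)) (nb : Int) (h : nb ∉ s.1) :
    pvStepA lvl1 s nb = (s.1 ++ [nb], s.2 ++ [(nb, lvl1)]) := by
  simp [pvStepA, PySem.Set.add, h]

theorem pvMem_getD_flatMap (graph : List (Int × List Int)) (node x : Int)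
    (hx : x ∈ PySem.Dict.getD ⟨graph⟩ node []) : x ∈ graph.flatMap Prod.snd := by
  unfold PySem.Dict.getD PySem.Dict.get? at hx
  cases hfind : List.find? (fun p => p.1 == node) graph with
  | none => simp [hfind] at hx
  | some p =>
    have hp := List.mem_of_find?_eq_some hfind
    simp [hfind] at hx
    exact List.mem_flatMap.2 ⟨p, hp, hx⟩

theorem pvUnseen_append_lt (graph : List (Int × List Int)) (v : PySem.Set Int) (nb : Int)
    (hmem : nb ∈ graph.flatMap Prod.snd) (hnv : nb ∉ v) :
    pvUnseen graph (v ++ [nb]) < pvUnseen graph v := by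
  unfold pvUnseen
  have hfilter : (graph.flatMap Prod.snd).filter (fun x => !(PySem.Set.contains (v ++ [nb]) x))
      = ((graph.flatMap Prod.snd).filter (fun x => !(PySem.Set.contains v x))).filter (fun x => !(x == nb)) := by
    rw [List.filter_filter]
    apply List.filter_congr
    intro x _
    by_cases h1 : x ∈ v <;> by_cases h2 : x = nb <;>
      simp [List.mem_append, h1, h2]
  rw [hfilter]
  apply List.length_filter_lt_length_iff_exists.2
  refine ⟨nb, List.mem_filter.2 ⟨hmem, by simp [hnv]⟩, by simp⟩

theorem pvFoldA_measure (graph : List (Int × List Int)) (lvl1 : Int) :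
    ∀ (ns : List Int), (∀ x ∈ ns, x ∈ graph.flatMap Prod.snd) →
    ∀ (v : PySem.Set Int) (q : List (Int × Int)),
      pvUnseen graph (ns.foldl (pvStepA lvl1) (v, q)).1 + (ns.foldl (pvStepA lvl1) (v, q)).2.length
        ≤ pvUnseen graph v + q.length := by
  intro ns
  induction ns with
  | nil => intro _ v q; simp only [List.foldl_nil]; omega
  | cons nb rest ih =>
    intro hmem v q
    simp only [List.foldl_cons]
    by_cases h : nb ∈ v
    · rw [pvStepA_pos lvl1 (v, q) nb h]
      exact ih (fun x hx => hmem x (List.mem_cons_of_mem _ hx)) v q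
    · rw [pvStepA_neg lvl1 (v, q) nb h]
      have h1 := ih (fun x hx => hmem x (List.mem_cons_of_mem _ hx)) (v ++ [nb]) (q ++ [(nb, lvl1)])
      have h2 := pvUnseen_append_lt graph v nb (hmem nb (List.mem_cons_self)) h
      simp only [List.length_append, List.length_cons, List.length_nil] at h1 ⊢
      omega

-- A's main `while queue` loop
def pvALoop (graph : List (Int × List Int)) (distance : Int) (visited : PySem.Set Int)
    (queue : List (Int × Int)) (acc : List Int) : List Int :=
  match queue with
  | [] => acc
  | (node, level) :: rest =>
    if level == distance then
      pvALoop graph distance visited rest (acc ++ [node])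
    else if level < distance then
      let st := (PySem.Dict.getD ⟨graph⟩ node []).foldl (pvStepA (level + 1)) (visited, rest)
      pvALoop graph distance st.1 st.2 acc
    else
      pvALoop graph distance visited rest acc
termination_by pvUnseen graph visited + queue.length
decreasing_by
  · simp only [List.length_cons]; omega
  · have := pvFoldA_measure graph (level + 1) (PySem.Dict.getD ⟨graph⟩ node [])
      (fun x hx => pvMem_getD_flatMap graph node x hx) visited rest
    simp only [List.length_cons]
    omega
  · simp only [List.length_cons]; omega

def bfs_all_paths_at_distance (graph : List (Int × List Int)) (start : Int) (distance : Int) : List Int :=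
  pvALoop graph distance (PySem.Set.ofList [start]) [(start, 0)] []

-- ===== PORT B =====
-- one step of B's inner `for neighbor in graph.get(node, [])` loop
def pvStepB (s : PySem.Set Int × List Int) (nb : Int) : PySem.Set Int × List Int :=
  if PySem.Set.contains s.1 nb then s else (PySem.Set.add s.1 nb, s.2 ++ [nb])

-- B's `for node in frontier` body: expand one node into (visited, next_frontier)
def pvExpand (graph : List (Int × List Int)) (s : PySem.Set Int × List Int) (node : Int) : PySem.Set Int × List Int :=
  (PySem.Dict.getD ⟨graph⟩ node []).foldl pvStepB s

-- B's `while level < distance and frontier` loop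
def pvBLoop (graph : List (Int × List Int)) (distance : Int) (visited : PySem.Set Int)
    (frontier : List Int) (level : Int) : List Int :=
  if level < distance ∧ frontier ≠ [] then
    let st := frontier.foldl (pvExpand graph) (visited, [])
    pvBLoop graph distance st.1 st.2 (level + 1)
  else if level == distance then frontier else []
termination_by (distance - level).toNat
decreasing_by omega

def bfs_all_paths_at_distance_alt (graph : List (Int × List Int)) (start : Int) (distance : Int) : List Int :=
  pvBLoop graph distance (PySem.Set.ofList [start]) [start] 0

-- ===== PRECONDITION & SPEC =====
def Spec_bfs_all_paths_at_distance (graph : List (Int × List Int)) (start : Int) (distance : Int) (out : List Int) : Prop := out = bfs_all_paths_at_distance_alt graph start distance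
instance (graph : List (Int × List Int)) (start : Int) (distance : Int) (out : List Int) : Decidable (Spec_bfs_all_paths_at_distance graph start distance out) := by unfold Spec_bfs_all_paths_at_distance; infer_instance

-- ===== CLAIM (what is proved, stated in full; the proofs are below) =====
def Claim_equal_bfs_all_paths_at_distance : Prop := ∀ (graph : List (Int × List Int)) (start : Int) (distance : Int), Dom_bfs_all_paths_at_distance graph start distance → Spec_bfs_all_paths_at_distance graph start distance (bfs_all_paths_at_distance graph start distance)

-- ===== LEMMAS AND PROOFS =====

theorem pvStepB_pos (s : PySem.Set Int × List Int) (nb : Int) (h : nb ∈ s.1) :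
    pvStepB s nb = s := by
  simp [pvStepB, h]

theorem pvStepB_neg (s : PySem.Set Int × List Int) (nb : Int) (h : nb ∉ s.1) :
    pvStepB s nb = (s.1 ++ [nb], s.2 ++ [nb]) := by
  simp [pvStepB, PySem.Set.add, h]

theorem pvALoop_nil (graph : List (Int × List Int)) (distance : Int) (v : PySem.Set Int) (acc : List Int) :
    pvALoop graph distance v [] acc = acc := by
  simp [pvALoop]

-- A's inner fold keeps the queue in shape `q0 ++ (next frontier tagged lvl1)`, and its
-- visited / appended-node components are exactly B's inner fold.
theorem pvFold_commute (lvl1 : Int) :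
    ∀ (ns : List Int) (v : PySem.Set Int) (q0 : List (Int × Int)) (nx : List Int),
      ns.foldl (pvStepA lvl1) (v, q0 ++ nx.map (fun x => (x, lvl1)))
        = ((ns.foldl pvStepB (v, nx)).1, q0 ++ (ns.foldl pvStepB (v, nx)).2.map (fun x => (x, lvl1))) := by
  intro ns
  induction ns with
  | nil => intro v q0 nx; rfl
  | cons nb rest ih =>
    intro v q0 nx
    simp only [List.foldl_cons]
    by_cases h : nb ∈ v
    · rw [pvStepA_pos lvl1 _ nb h, pvStepB_pos _ nb h]
      exact ih v q0 nx
    · rw [pvStepA_neg lvl1 _ nb h, pvStepB_neg _ nb h]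
      have h1 := ih (v ++ [nb]) q0 (nx ++ [nb])
      simp only [List.map_append, List.map_cons, List.map_nil, List.append_assoc] at h1 ⊢
      exact h1

-- once every queued node is at level `distance`, A just drains the queue into acc
theorem pvALoop_drain (graph : List (Int × List Int)) (distance : Int) :
    ∀ (f : List Int) (v : PySem.Set Int) (acc : List Int),
      pvALoop graph distance v (f.map (fun x => (x, distance))) acc = acc ++ f := by
  intro f
  induction f with
  | nil => intro v acc; simp [pvALoop]
  | cons x rest ih =>
    intro v acc
    rw [List.map_cons, pvALoop, if_pos (show (distance == distance) = true by simp)]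
    rw [ih v (acc ++ [x])]
    simp

-- A's processing of one whole level equals B's frontier fold
theorem pvALoop_level (graph : List (Int × List Int)) (distance L : Int) (hL : L < distance) :
    ∀ (restF : List Int) (v : PySem.Set Int) (nx : List Int) (acc : List Int),
      pvALoop graph distance v (restF.map (fun x => (x, L)) ++ nx.map (fun x => (x, L + 1))) acc
        = pvALoop graph distance (restF.foldl (pvExpand graph) (v, nx)).1
            ((restF.foldl (pvExpand graph) (v, nx)).2.map (fun x => (x, L + 1))) acc := by
  intro restF
  induction restF with
  | nil => intro v nx acc; rfl
  | cons node rf ih =>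
    intro v nx acc
    have hne : ¬ ((L == distance) = true) := by simp; omega
    rw [List.map_cons, List.cons_append, pvALoop, if_neg hne, if_pos hL]
    rw [pvFold_commute (L + 1) (PySem.Dict.getD ⟨graph⟩ node []) v (rf.map (fun x => (x, L))) nx]
    exact ih (pvExpand graph (v, nx) node).1 (pvExpand graph (v, nx) node).2 acc

-- main correspondence: A from a level-L frontier equals B's level loop
theorem pvLoop_eq (graph : List (Int × List Int)) (distance : Int) :
    ∀ (k : Nat) (L : Int) (f : List Int) (v : PySem.Set Int),
      L ≤ distance → (distance - L).toNat = k →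
      pvALoop graph distance v (f.map (fun x => (x, L))) [] = pvBLoop graph distance v f L := by
  intro k
  induction k with
  | zero =>
    intro L f v hle hk
    have hLd : L = distance := by omega
    subst hLd
    rw [pvALoop_drain, pvBLoop, if_neg (by simp), if_pos (by simp)]
    simp
  | succ k ih =>
    intro L f v hle hk
    have hlt : L < distance := by omega
    cases f with
    | nil =>
      rw [pvBLoop, if_neg (by simp), if_neg (by simp; omega)]
      simp [pvALoop]
    | cons x rest =>
      have hlev := pvALoop_level graph distance L hlt (x :: rest) v [] []
      simp only [List.map_nil, List.append_nil] at hlev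
      rw [hlev]
      rw [ih (L + 1) ((x :: rest).foldl (pvExpand graph) (v, [])).2
          ((x :: rest).foldl (pvExpand graph) (v, [])).1 (by omega) (by omega)]
      conv_rhs => rw [pvBLoop]
      rw [if_pos ⟨hlt, by simp⟩]

-- ===== VERDICT (by name: the statement is the Claim_ definition above) =====
theorem bfs_all_paths_at_distance_spec : Claim_equal_bfs_all_paths_at_distance := by
  intro graph start distance _
  unfold Spec_bfs_all_paths_at_distance bfs_all_paths_at_distance bfs_all_paths_at_distance_alt
  by_cases hd : 0 ≤ distance
  · have h := pvLoop_eq graph distance (distance - 0).toNat 0 [start] (PySem.Set.ofList [start]) hd rfl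
    simpa using h
  · have hne0 : ¬ (((0 : Int) == distance) = true) := by simp; omega
    have hnlt : ¬ ((0 : Int) < distance) := by omega
    rw [pvALoop, if_neg hne0, if_neg hnlt, pvALoop_nil]
    rw [pvBLoop, if_neg (fun hc => hnlt hc.1), if_neg hne0]
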